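-- pv_equiv track=rewrite | github.com/east-lee/Algorithm | BOJ/[BOJ]1120.문자열.py | find_same_length
-- ===== SOURCE A (Python) =====
-- def find_same_length(n,A):
--   return_list = []
--
--   for i in range(n+1):
--     new_A = A[:]
--     front_cnt = i
--     back_cnt = (n-i)
--
--     for _ in range(front_cnt):
--       new_A.insert(0,'.')
--     for _ in range(back_cnt):
--       new_A.append('.')
--     return_list.append(new_A)
--   return return_list
-- ===== SOURCE B (Python) =====
-- def find_same_length(n, A):
--     buffer = ['.'] * n + A + ['.'] * n
--     width = n + len(A)
--     return [buffer[n - i: n - i + width] for i in range(n + 1)]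
-- ===== Notes on version B (the rewrite author's own statement) =====
-- stated objective: alternative
-- what changed: B builds one shared padded buffer once and emits each row as a fixed-width slice of it, replacing A's per-row loops of insert(0,'.') and append('.'); intended to avoid insert(0)'s per-call row shift, measured faster on some runs only.
import Mathlib
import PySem

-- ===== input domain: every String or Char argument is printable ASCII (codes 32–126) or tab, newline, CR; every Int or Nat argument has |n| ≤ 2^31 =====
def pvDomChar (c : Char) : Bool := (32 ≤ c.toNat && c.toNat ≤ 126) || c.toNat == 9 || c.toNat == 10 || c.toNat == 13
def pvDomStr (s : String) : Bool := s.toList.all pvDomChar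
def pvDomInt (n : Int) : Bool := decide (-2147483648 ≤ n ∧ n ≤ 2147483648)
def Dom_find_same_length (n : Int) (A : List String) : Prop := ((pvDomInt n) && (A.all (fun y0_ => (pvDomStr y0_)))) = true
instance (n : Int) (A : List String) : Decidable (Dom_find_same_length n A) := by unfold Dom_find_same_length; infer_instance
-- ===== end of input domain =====

-- B builds one shared padded buffer and emits each row as a fixed-width slice of it,
-- replacing A's per-row insert(0,...)/append padding loops (objective: alternative).

-- ===== PORT A =====
def find_same_length (n : Int) (A : List String) : List (List String) :=
  (PySem.List.pyRange 0 (n + 1) 1).foldl (fun return_list i =>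
    let new_A := A
    let front_cnt := i
    let back_cnt := n - i
    let new_A := (PySem.List.pyRange 0 front_cnt 1).foldl (fun l _ => "." :: l) new_A
    let new_A := (PySem.List.pyRange 0 back_cnt 1).foldl (fun l _ => l ++ ["."]) new_A
    return_list ++ [new_A]) []

-- ===== PORT B =====
def find_same_length_alt (n : Int) (A : List String) : List (List String) :=
  let buffer := List.replicate n.toNat "." ++ A ++ List.replicate n.toNat "."
  let width := n + (A.length : Int)
  (PySem.List.pyRange 0 (n + 1) 1).map (fun i =>
    PySem.List.slice buffer (some (n - i)) (some (n - i + width)))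

-- ===== PRECONDITION & SPEC =====
def Spec_find_same_length (n : Int) (A : List String) (out : List (List String)) : Prop := out = find_same_length_alt n A
instance (n : Int) (A : List String) (out : List (List String)) : Decidable (Spec_find_same_length n A out) := by unfold Spec_find_same_length; infer_instance

-- ===== CLAIM (what is proved, stated in full; the proofs are below) =====
def Claim_equal_find_same_length : Prop := ∀ (n : Int) (A : List String), Dom_find_same_length n A → Spec_find_same_length n A (find_same_length n A)

-- ===== LEMMAS AND PROOFS =====

theorem foldl_cons_pyRange (m : Int) (init : List String) :
    (PySem.List.pyRange 0 m 1).foldl (fun l (_ : Int) => "." :: l) init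
      = List.replicate m.toNat "." ++ init := by
  rw [PySem.List.pyRange_one, List.foldl_map]
  simp

theorem foldl_append_pyRange (m : Int) (init : List String) :
    (PySem.List.pyRange 0 m 1).foldl (fun l (_ : Int) => l ++ ["."]) init
      = init ++ List.replicate m.toNat "." := by
  rw [PySem.List.pyRange_one, List.foldl_map]
  simp

-- foldl with append-of-singleton is map
theorem foldl_append_singleton_eq_map (g : Int → List String) (l : List Int) (init : List (List String)) :
    l.foldl (fun acc i => acc ++ [g i]) init = init ++ l.map g := by
  induction l generalizing init with
  | nil => simp
  | cons x xs ih => simp [ih]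

-- the row both programs produce for 0 ≤ i ≤ n
theorem row_eq (n i : Int) (A : List String) (h0 : 0 ≤ i) (h1 : i ≤ n) :
    PySem.List.slice (List.replicate n.toNat "." ++ A ++ List.replicate n.toNat ".")
        (some (n - i)) (some (n - i + (n + (A.length : Int))))
      = List.replicate i.toNat "." ++ A ++ List.replicate (n - i).toNat "." := by
  have hn : 0 ≤ n := le_trans h0 h1
  rw [PySem.List.slice_toNat _ (by omega) (by omega)]
  have h2 : (n - i + (n + (A.length : Int))).toNat - (n - i).toNat = n.toNat + A.length := by omega
  have h3 : (n - i).toNat ≤ n.toNat := by omega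
  rw [h2]
  rw [List.append_assoc, List.drop_append_of_le_length (by simp [h3]),
      List.drop_replicate]
  have h4 : n.toNat - (n - i).toNat = i.toNat := by omega
  rw [h4]
  have h5 : n.toNat + A.length
      = (List.replicate i.toNat "." (α := String)).length + (A.length + (n.toNat - i.toNat)) := by
    simp; omega
  rw [h5, List.take_append, List.take_append, List.append_assoc]
  congr 2
  all_goals simp
  omega

theorem find_same_length_eq (n : Int) (A : List String) :
    find_same_length n A = find_same_length_alt n A := by
  unfold find_same_length find_same_length_alt
  rw [foldl_append_singleton_eq_map]
  simp only [List.nil_append]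
  apply List.map_congr_left
  intro i hi
  rw [PySem.List.mem_pyRange_one] at hi
  rw [foldl_cons_pyRange, foldl_append_pyRange, row_eq n i A hi.1 (by omega)]

-- ===== VERDICT (by name: the statement is the Claim_ definition above) =====
theorem find_same_length_spec : Claim_equal_find_same_length := by
  intro n A _
  exact find_same_length_eq n A
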